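-- pv_equiv track=rewrite | github.com/MCYJ/problem-solving | 1011.py | distCal
-- ===== SOURCE A (Python) =====
-- def distCal(dist):
--     count = 0
--     while dist > 1:
--         criteria = 2
--         while dist > 1:
--             dist -= criteria
--             count += 1
--             criteria += 1
--         if dist < 0:
--             dist += criteria-1
--     return count+dist
-- ===== SOURCE B (Python) =====
-- def _isqrt(n):
--     # Newton (Babylonian) integer square root; hand-written since A imports nothing.
--     if n <= 1:
--         return n
--     guess = n // 2
--     while True:
--         nxt = (guess + n // guess) // 2
--         if nxt < guess:
--             guess = nxt
--         else:
--             return guess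
--
--
-- def distCal(dist):
--     count = 0
--     while dist > 1:
--         # smallest m >= 1 with (m+1)(m+2)/2 >= dist, via isqrt estimate + exact adjust
--         s = _isqrt(8 * dist + 1)
--         m = (s - 1) // 2
--         if m < 1:
--             m = 1
--         while (m + 1) * (m + 2) < 2 * dist:
--             m += 1
--         while m > 1 and m * (m + 1) >= 2 * dist:
--             m -= 1
--         count += m
--         rem = dist - ((m + 1) * (m + 2) // 2 - 1)
--         dist = rem + m + 1 if rem < 0 else rem
--     return count + dist
-- ===== Notes on version B (the rewrite author's own statement) =====
-- stated objective: faster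
-- what changed: A's inner loop subtracts 2,3,4,... one step at a time (~sqrt(dist) iterations per pass); B computes the step count m of each pass arithmetically as the least m>=1 with (m+1)(m+2)/2 >= dist, found from a hand-written Newton integer square root plus O(1) exact adjustment, then updates dist and count in closed form.
import Mathlib
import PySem

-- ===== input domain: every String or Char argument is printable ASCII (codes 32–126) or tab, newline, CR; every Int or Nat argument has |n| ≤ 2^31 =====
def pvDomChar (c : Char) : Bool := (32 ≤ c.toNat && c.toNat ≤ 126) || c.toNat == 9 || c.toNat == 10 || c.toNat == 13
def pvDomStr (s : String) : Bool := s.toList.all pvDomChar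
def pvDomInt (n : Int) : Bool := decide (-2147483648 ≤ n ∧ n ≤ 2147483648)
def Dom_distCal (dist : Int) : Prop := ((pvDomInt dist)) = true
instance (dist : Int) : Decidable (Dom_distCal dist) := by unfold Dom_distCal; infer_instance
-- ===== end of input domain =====

-- B replaces A's inner subtract-2,3,4,… scan (many iterations per pass) by an arithmetic
-- solve: an integer-Newton isqrt estimate of the pass's step count, corrected exactly by two
-- bounded adjustment loops; objective: faster. (Loops are ported with a fuel parameter as a
-- totality guard only; the fuel chosen is always sufficient on the loops' reachable states.)

-- ===== PORT A =====
-- A's inner `while dist > 1: dist -= criteria; count += 1; criteria += 1` loop.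
-- `criteria` (which starts at 2 and only grows) is carried as `c + 2` with `c : Nat`.
def distCalInner : Nat → Int → Int → Nat → Int × Int × Nat
  | 0, d, cnt, c => (d, cnt, c)
  | f + 1, d, cnt, c =>
    if 1 < d then distCalInner f (d - ((c : Int) + 2)) (cnt + 1) (c + 1) else (d, cnt, c)

-- A's outer loop; the correction `dist += criteria - 1` is `r.1 + ((c' + 2) - 1)` = `r.1 + c' + 1`.
def distCalOuter : Nat → Int → Int → Int
  | 0, d, cnt => cnt + d
  | f + 1, d, cnt =>
    if 1 < d then
      distCalOuter f
        (if (distCalInner d.toNat d cnt 0).1 < 0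
         then (distCalInner d.toNat d cnt 0).1 + ((distCalInner d.toNat d cnt 0).2.2 : Int) + 1
         else (distCalInner d.toNat d cnt 0).1)
        (distCalInner d.toNat d cnt 0).2.1
    else cnt + d

def distCal (dist : Int) : Int := distCalOuter dist.toNat dist 0

-- ===== PORT B =====
-- _isqrt's Newton loop (Source B): guess ↦ (guess + n // guess) // 2 while it decreases.
def isqrtIter : Nat → Int → Int → Int
  | 0, _, g => g
  | f + 1, n, g =>
    if PySem.Int.floordiv (g + PySem.Int.floordiv n g) 2 < g then
      isqrtIter f n (PySem.Int.floordiv (g + PySem.Int.floordiv n g) 2)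
    else g

def isqrt (n : Int) : Int :=
  if n ≤ 1 then n else isqrtIter n.toNat n (PySem.Int.floordiv n 2)

-- Source B's `while (m + 1) * (m + 2) < 2 * dist: m += 1`
def stepUp : Nat → Int → Int → Int
  | 0, _, m => m
  | f + 1, d, m => if (m + 1) * (m + 2) < 2 * d then stepUp f d (m + 1) else m

-- Source B's `while m > 1 and m * (m + 1) >= 2 * dist: m -= 1`
def stepDown : Nat → Int → Int → Int
  | 0, _, m => m
  | f + 1, d, m => if 1 < m ∧ 2 * d ≤ m * (m + 1) then stepDown f d (m - 1) else m

-- the value of m after Source B's estimate + two adjustment loops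
def distCalAltStepM (d : Int) : Int :=
  stepDown
    (stepUp d.toNat d
      (if PySem.Int.floordiv (isqrt (8 * d + 1) - 1) 2 < 1 then 1
       else PySem.Int.floordiv (isqrt (8 * d + 1) - 1) 2)).toNat
    d
    (stepUp d.toNat d
      (if PySem.Int.floordiv (isqrt (8 * d + 1) - 1) 2 < 1 then 1
       else PySem.Int.floordiv (isqrt (8 * d + 1) - 1) 2))

-- B's outer loop (Source B's `while dist > 1`)
def distCalAltOuter : Nat → Int → Int → Int
  | 0, d, cnt => cnt + d
  | f + 1, d, cnt =>
    if 1 < d then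
      distCalAltOuter f
        (if d - (PySem.Int.floordiv ((distCalAltStepM d + 1) * (distCalAltStepM d + 2)) 2 - 1) < 0
         then d - (PySem.Int.floordiv ((distCalAltStepM d + 1) * (distCalAltStepM d + 2)) 2 - 1)
              + distCalAltStepM d + 1
         else d - (PySem.Int.floordiv ((distCalAltStepM d + 1) * (distCalAltStepM d + 2)) 2 - 1))
        (cnt + distCalAltStepM d)
    else cnt + d

def distCal_alt (dist : Int) : Int := distCalAltOuter dist.toNat dist 0

-- ===== PRECONDITION & SPEC =====
def Spec_distCal (dist : Int) (out : Int) : Prop := out = distCal_alt dist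
instance (dist : Int) (out : Int) : Decidable (Spec_distCal dist out) := by unfold Spec_distCal; infer_instance

-- ===== CLAIM (what is proved, stated in full; the proofs are below) =====
def Claim_equal_distCal : Prop := ∀ (dist : Int), Dom_distCal dist → Spec_distCal dist (distCal dist)

-- ===== LEMMAS AND PROOFS =====

-- monotonicity of the stopping condition 2*d ≤ (x+1)*(x+2) in x
theorem cond_mono (d : Int) (i x : Int) (h0 : 0 ≤ i) (hix : i ≤ x)
    (hc : 2 * d ≤ (i + 1) * (i + 2)) : 2 * d ≤ (x + 1) * (x + 2) := by nlinarith

-- with enough fuel, stepUp reaches a value satisfying the condition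
theorem stepUp_facts (d : Int) : ∀ (f : Nat) (m : Int),
    (∃ j : Nat, (j : Int) ≤ (f : Int) ∧ 2 * d ≤ (m + j + 1) * (m + j + 2)) →
    m ≤ stepUp f d m ∧ 2 * d ≤ (stepUp f d m + 1) * (stepUp f d m + 2) := by
  intro f
  induction f with
  | zero =>
    intro m ⟨j, hj, hc⟩
    have hj0 : (j : Int) = 0 := by omega
    rw [hj0] at hc
    rw [stepUp]
    constructor
    · omega
    · rw [show m + 0 + 1 = m + 1 from by ring, show m + 0 + 2 = m + 2 from by ring] at hc
      exact hc
  | succ f ih =>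
    intro m ⟨j, hj, hc⟩
    rw [stepUp]
    by_cases hlt : (m + 1) * (m + 2) < 2 * d
    · rw [if_pos hlt]
      have hj1 : j ≠ 0 := by
        intro h0
        rw [h0] at hc; push_cast at hc
        rw [show m + 0 + 1 = m + 1 from by ring, show m + 0 + 2 = m + 2 from by ring] at hc
        omega
      obtain ⟨j', rfl⟩ := Nat.exists_eq_succ_of_ne_zero hj1
      have := ih (m + 1) ⟨j', by push_cast; push_cast at hj; omega,
        by push_cast; push_cast at hc; rw [show m + 1 + j' + 1 = m + (j' + 1) + 1 from by ring,
          show m + 1 + j' + 2 = m + (j' + 1) + 2 from by ring]; exact hc⟩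
      exact ⟨by omega, this.2⟩
    · rw [if_neg hlt]
      exact ⟨le_refl m, by omega⟩

-- with fuel ≥ m - 1, stepDown descends to the least value ≥ 1 satisfying the condition
theorem stepDown_facts (d : Int) : ∀ (f : Nat) (m : Int), 1 ≤ m →
    2 * d ≤ (m + 1) * (m + 2) → m ≤ (f : Int) + 1 →
    1 ≤ stepDown f d m ∧ 2 * d ≤ (stepDown f d m + 1) * (stepDown f d m + 2) ∧
      (stepDown f d m = 1 ∨ stepDown f d m * (stepDown f d m + 1) < 2 * d) := by
  intro f
  induction f with
  | zero =>
    intro m h1 h2 hf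
    have : m = 1 := by omega
    subst this
    rw [stepDown]
    exact ⟨le_refl 1, h2, Or.inl rfl⟩
  | succ f ih =>
    intro m h1 h2 hf
    rw [stepDown]
    by_cases hc : 1 < m ∧ 2 * d ≤ m * (m + 1)
    · rw [if_pos hc]
      exact ih (m - 1) (by omega)
        (by rw [show m - 1 + 1 = m from by ring, show m - 1 + 2 = m + 1 from by ring]; exact hc.2)
        (by push_cast; omega)
    · rw [if_neg hc]
      refine ⟨h1, h2, ?_⟩
      rcases eq_or_lt_of_le h1 with h1' | h1'
      · exact Or.inl h1'.symm
      · refine Or.inr ?_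
        by_contra hcon
        exact hc ⟨h1', not_lt.mp hcon⟩

-- Source B's m is ≥ 1, satisfies the condition, and is locally minimal (for dist > 1)
theorem distCalAltStepM_facts (d : Int) (hd : 1 < d) :
    1 ≤ distCalAltStepM d ∧ 2 * d ≤ (distCalAltStepM d + 1) * (distCalAltStepM d + 2) ∧
      (distCalAltStepM d = 1 ∨ distCalAltStepM d * (distCalAltStepM d + 1) < 2 * d) := by
  unfold distCalAltStepM
  set m0 := (if PySem.Int.floordiv (isqrt (8 * d + 1) - 1) 2 < 1 then 1
       else PySem.Int.floordiv (isqrt (8 * d + 1) - 1) 2) with hm0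
  have hm1 : 1 ≤ m0 := by rw [hm0]; split <;> omega
  have hex : ∃ j : Nat, (j : Int) ≤ (d.toNat : Int) ∧ 2 * d ≤ (m0 + j + 1) * (m0 + j + 2) := by
    have hdd : 2 * d ≤ (d + 1) * (d + 2) := by nlinarith
    by_cases hlt : m0 < d
    · refine ⟨(d - m0).toNat, by omega, ?_⟩
      rw [show ((d - m0).toNat : Int) = d - m0 from by omega]
      rw [show m0 + (d - m0) + 1 = d + 1 from by ring, show m0 + (d - m0) + 2 = d + 2 from by ring]
      exact hdd
    · refine ⟨0, by omega, ?_⟩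
      push_cast
      exact cond_mono d d (m0 + 0) (by omega) (by omega) hdd
  obtain ⟨hu1, hu2⟩ := stepUp_facts d d.toNat m0 hex
  exact stepDown_facts d _ _ (by omega) hu2 (by omega)

-- (m+1)(m+2) is even, so `(m+1)*(m+2) // 2` is exact division
theorem floordiv_even_half (m : Int) :
    2 * PySem.Int.floordiv ((m + 1) * (m + 2)) 2 = (m + 1) * (m + 2) := by
  obtain ⟨t, ht⟩ := Int.even_mul_succ_self (m + 1)
  have h2 : (m + 1) * (m + 2) = 2 * t := by ring_nf; ring_nf at ht; omega
  have := (PySem.Int.floordiv_eq_iff_of_pos (a := (m + 1) * (m + 2)) (b := 2) (q := t)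
    (by omega)).mpr (by omega)
  omega

-- S j = 2 + 3 + … + (j+1): the total subtracted by A's inner loop after j steps
def sumSteps : Nat → Int
  | 0 => 0
  | j + 1 => sumSteps j + ((j : Int) + 2)

theorem sumSteps_closed (j : Nat) : 2 * sumSteps j = (j : Int) * j + 3 * j := by
  induction j with
  | zero => simp [sumSteps]
  | succ j ih => rw [sumSteps]; push_cast; push_cast at ih; ring_nf; ring_nf at ih; omega

-- A's inner loop, run from stage j with k = m - j steps remaining, lands exactly at stage m
theorem distCalInner_stage (k : Nat) : ∀ (f : Nat) (j : Nat) (d cnt : Int) (m : Int),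
    ((j : Int) + k = m) →
    (∀ i : Nat, (i : Int) < m → ¬ (2 * d ≤ ((i : Int) + 1) * ((i : Int) + 2))) →
    (2 * d ≤ (m + 1) * (m + 2)) → k ≤ f →
    distCalInner f (d - sumSteps j) (cnt + j) j =
      (d - sumSteps (j + k), cnt + ((j + k : Nat) : Int), j + k) := by
  induction k with
  | zero =>
    intro f j d cnt m hjk hlt hm hf
    have hj : (j : Int) = m := by omega
    have hs := sumSteps_closed j
    have hle : ¬ 1 < d - sumSteps j := by rw [hj] at hs; nlinarith
    cases f with
    | zero => rw [distCalInner]; push_cast; simp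
    | succ f => rw [distCalInner, if_neg hle]; push_cast; simp
  | succ k ih =>
    intro f j d cnt m hjk hlt hm hf
    have hcond : ¬ (2 * d ≤ ((j : Int) + 1) * ((j : Int) + 2)) := hlt j (by omega)
    have hs := sumSteps_closed j
    have hgt : 1 < d - sumSteps j := by nlinarith
    obtain ⟨f', rfl⟩ := Nat.exists_eq_succ_of_ne_zero (show f ≠ 0 from by omega)
    rw [distCalInner, if_pos hgt]
    have harg : d - sumSteps j - ((j : Int) + 2) = d - sumSteps (j + 1) := by
      rw [show j + 1 = j + 1 from rfl, sumSteps]; ring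
    have hcnt : cnt + (j : Int) + 1 = cnt + ((j : Nat) + 1 : Nat) := by push_cast; ring
    rw [harg, hcnt]
    have := ih f' (j + 1) d cnt m (by push_cast; omega) hlt hm (by omega)
    rw [this, show j + 1 + k = j + (k + 1) from by omega]

-- bridge: A's inner loop from criteria = 2 computes exactly B's m and the same remainder
theorem distCalInner_bridge (d cnt : Int) (h : 1 < d) :
    distCalInner d.toNat d cnt 0 =
      (d - sumSteps (distCalAltStepM d).toNat, cnt + distCalAltStepM d,
        (distCalAltStepM d).toNat) := by
  obtain ⟨h1, h2, h3⟩ := distCalAltStepM_facts d h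
  set m := distCalAltStepM d with hm
  have hmN : ((m.toNat : Int)) = m := Int.toNat_of_nonneg (by omega)
  have hmd : m ≤ d := by
    rcases h3 with h3 | h3
    · omega
    · nlinarith
  have hlt : ∀ i : Nat, (i : Int) < m → ¬ (2 * d ≤ ((i : Int) + 1) * ((i : Int) + 2)) := by
    intro i hi hcond
    rcases h3 with h3 | h3
    · have : (i : Int) = 0 := by omega
      rw [this] at hcond; norm_num at hcond; omega
    · have : 2 * d ≤ (m - 1 + 1) * (m - 1 + 2) :=
        cond_mono d i (m - 1) (by positivity) (by omega) hcond
      nlinarith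
  have h0 := distCalInner_stage m.toNat d.toNat 0 d cnt m (by omega) hlt h2 (by omega)
  simp only [sumSteps, Nat.cast_zero, zero_add, sub_zero, add_zero] at h0
  rw [hmN] at h0
  exact h0

-- the two outer loops agree in lockstep: each pass updates (dist, count) identically
theorem outer_eq (f : Nat) : ∀ (d cnt : Int),
    distCalOuter f d cnt = distCalAltOuter f d cnt := by
  induction f with
  | zero => intro d cnt; rfl
  | succ f ih =>
    intro d cnt
    by_cases h : 1 < d
    · obtain ⟨h1, h2, h3⟩ := distCalAltStepM_facts d h
      set m := distCalAltStepM d with hm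
      have hmN : ((m.toNat : Int)) = m := Int.toNat_of_nonneg (by omega)
      have hbr := distCalInner_bridge d cnt h
      have hfd : PySem.Int.floordiv ((m + 1) * (m + 2)) 2 - 1 = sumSteps m.toNat := by
        have he := floordiv_even_half m
        have hs := sumSteps_closed m.toNat
        rw [hmN] at hs; nlinarith
      rw [distCalOuter, if_pos h, distCalAltOuter, if_pos h, hbr, ← hm, hfd]
      simp only [hmN]
      exact ih _ _
    · rw [distCalOuter, if_neg h, distCalAltOuter, if_neg h]

-- ===== VERDICT (by name: the statement is the Claim_ definition above) =====
theorem distCal_spec : Claim_equal_distCal := by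
  intro dist _
  unfold Spec_distCal distCal distCal_alt
  exact outer_eq dist.toNat dist 0
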